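-- pv_equiv track=rewrite | github.com/billyxs/notes.md | python/learning/python_morsels/2019-05-06_window/window.py | window_3
-- ===== SOURCE A (Python) =====
-- def window_3(iterable, n):
--     """Returns a list of tuples of items in given list and next n-1 items."""
--     items = []
--     current = ()
--     for item in iterable:
--         if len(current) < n:
--             current = current + (item,)
--         else:
--             current = current[1:] + (item,)
--         if len(current) == n:
--             items.append(current)
--     return items
-- ===== SOURCE B (Python) =====
-- def window_3(iterable, n):
--     """Returns a list of tuples of items in given list and next n-1 items."""
--     if n <= 0:
--         return []
--     seq = list(iterable)
--     result = []
--     while len(seq) >= n: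
--         result.append(tuple(seq[:n]))
--         seq = seq[1:]
--     return result
-- ===== Notes on version B (the rewrite author's own statement) =====
-- stated objective: alternative
-- what changed: Replaced A's rolling-tuple accumulation (grow/shift a current tuple per element inside one fold) with a suffix-peeling loop: take the first n items as a window, drop the head, repeat while the list is at least n long.
import Mathlib
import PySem

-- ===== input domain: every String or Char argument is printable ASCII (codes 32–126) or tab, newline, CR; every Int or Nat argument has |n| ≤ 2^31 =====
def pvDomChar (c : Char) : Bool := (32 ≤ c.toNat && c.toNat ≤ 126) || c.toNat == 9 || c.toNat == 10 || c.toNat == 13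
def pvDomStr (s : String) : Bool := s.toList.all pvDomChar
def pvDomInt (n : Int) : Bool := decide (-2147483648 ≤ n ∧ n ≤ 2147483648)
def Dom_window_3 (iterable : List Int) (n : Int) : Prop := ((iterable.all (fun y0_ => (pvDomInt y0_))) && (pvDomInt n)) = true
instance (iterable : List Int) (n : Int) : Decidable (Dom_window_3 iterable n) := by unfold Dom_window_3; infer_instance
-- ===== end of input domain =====

-- B replaces A's rolling-tuple fold with a suffix-peeling loop (take first n, drop head); same result, similar cost.


-- ===== PORT A =====
-- one loop iteration of A: grow `current` (or shift it, current[1:] = .tail) and append when full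
def wstep (n : Int) (st : List (List Int) × List Int) (item : Int) : List (List Int) × List Int :=
  let current := if ((st.2.length : Int) < n) then st.2 ++ [item] else st.2.tail ++ [item]
  (if ((current.length : Int) = n) then st.1 ++ [current] else st.1, current)

def window_3 (iterable : List Int) (n : Int) : List (List Int) :=
  (iterable.foldl (wstep n) ([], [])).1

-- ===== PORT B =====
-- the while-loop of Source B: while len(seq) >= n: append seq[:n]; seq = seq[1:]
-- (reached only with n ≥ 1, so the empty list always fails the condition; seq[:n] = take n.toNat)
def windowAltGo (n : Int) : List Int → List (List Int)
  | [] => []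
  | x :: rest => if n ≤ ((x :: rest).length : Int) then (x :: rest).take n.toNat :: windowAltGo n rest else []

def window_3_alt (iterable : List Int) (n : Int) : List (List Int) :=
  if n ≤ 0 then [] else windowAltGo n iterable

-- ===== PRECONDITION & SPEC =====
def Spec_window_3 (iterable : List Int) (n : Int) (out : List (List Int)) : Prop := out = window_3_alt iterable n
instance (iterable : List Int) (n : Int) (out : List (List Int)) : Decidable (Spec_window_3 iterable n out) := by unfold Spec_window_3; infer_instance

-- ===== CLAIM (what is proved, stated in full; the proofs are below) =====
def Claim_equal_window_3 : Prop := ∀ (iterable : List Int) (n : Int), Dom_window_3 iterable n → Spec_window_3 iterable n (window_3 iterable n)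

-- ===== LEMMAS AND PROOFS =====

-- for n ≤ 0, A's current is never of length n (it always ends with the item just added), so items stays []
theorem foldl_wstep_nonpos (n : Int) (hn : n ≤ 0) :
    ∀ (l : List Int) (items : List (List Int)) (current : List Int),
      (l.foldl (wstep n) (items, current)).1 = items := by
  intro l
  induction l with
  | nil => intro items current; simp
  | cons x rest ih =>
    intro items current
    simp only [List.foldl_cons]
    rw [show (wstep n (items, current) x) =
        (items, if ((current.length : Int) < n) then current ++ [x] else current.tail ++ [x]) from ?_]
    · exact ih _ _
    · unfold wstep
      simp only []
      split_ifs with h1 h2 h3 <;> simp_all <;> omega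

theorem windowAltGo_nil_of_lt (n : Int) : ∀ (l : List Int), (l.length : Int) < n → windowAltGo n l = [] := by
  intro l hl
  cases l with
  | nil => rfl
  | cons x rest =>
    unfold windowAltGo
    rw [if_neg]
    omega

theorem windowAltGo_append (n : Int) (hn : 1 ≤ n) (x : Int) :
    ∀ (p : List Int),
      windowAltGo n (p ++ [x]) =
        windowAltGo n p ++
          (if n ≤ (p.length + 1 : Int) then [(p ++ [x]).drop (p.length + 1 - n.toNat)] else []) := by
  intro p
  induction p with
  | nil =>
    by_cases h : n ≤ 1
    · have hn1 : n = 1 := le_antisymm h hn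
      subst hn1
      simp [windowAltGo]
    · simp only [List.nil_append, windowAltGo, List.length_cons, List.length_nil]
      rw [if_neg (by omega)]
      simp
      omega
  | cons a p ih =>
    have hk : (n.toNat : Int) = n := Int.toNat_of_nonneg (by omega)
    simp only [List.cons_append, windowAltGo, ih, List.length_cons, List.length_append,
      List.length_nil]
    split_ifs with hA hB hC hD hE <;>
      first
      | (exfalso; omega)
      | skip
    · -- n ≤ |p|+1: the head window lies inside a :: p, the new window is appended at the end
      have hkle : n.toNat ≤ (a :: p).length := by simp; omega
      have htake : (a :: (p ++ [x])).take n.toNat = (a :: p).take n.toNat := by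
        rw [← List.cons_append, List.take_append_of_le_length hkle]
      have hdrop : (a :: (p ++ [x])).drop (p.length + 1 + 1 - n.toNat) =
          (p ++ [x]).drop (p.length + 1 - n.toNat) := by
        have h : p.length + 1 + 1 - n.toNat = (p.length + 1 - n.toNat) + 1 := by omega
        rw [h, List.drop_succ_cons]
      rw [htake, hdrop]
      simp
    · -- |p|+1 < n ≤ |p|+2: exactly one window, the whole of a :: p ++ [x]
      have hgo : windowAltGo n p = [] := windowAltGo_nil_of_lt n p (by omega)
      have hd0 : p.length + 1 + 1 - n.toNat = 0 := by omega
      have htake : (a :: (p ++ [x])).take n.toNat = a :: (p ++ [x]) :=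
        List.take_of_length_le (by simp; omega)
      rw [hgo, hd0, htake]
      simp
    · simp

theorem foldl_wstep_invariant (n : Int) (hn : 1 ≤ n) (p : List Int) :
    p.foldl (wstep n) ([], []) = (windowAltGo n p, p.drop (p.length - n.toNat)) := by
  induction p using List.reverseRecOn with
  | nil => simp [windowAltGo]
  | append_singleton p x ih =>
    have hk : (n.toNat : Int) = n := Int.toNat_of_nonneg (by omega)
    rw [List.foldl_append, ih, List.foldl_cons, List.foldl_nil]
    simp only [wstep]
    rw [windowAltGo_append n hn x p]
    by_cases hlt : p.length < n.toNat
    · -- current = p (shorter than n): grow it with x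
      rw [show p.length - n.toNat = 0 from by omega]
      simp only [List.drop_zero]
      rw [if_pos (show ((p.length : Int) < n) from by omega)]
      by_cases hfull : n ≤ (p.length + 1 : Int)
      · rw [if_pos (show (((p ++ [x]).length : Int) = n) from by simp; omega), if_pos hfull]
        rw [show p.length + 1 - n.toNat = 0 from by omega,
            show (p ++ [x]).length - n.toNat = 0 from by simp; omega]
        simp
      · rw [if_neg (show ¬ (((p ++ [x]).length : Int) = n) from by simp; omega), if_neg hfull]
        rw [show (p ++ [x]).length - n.toNat = 0 from by simp; omega]
        simp
    · -- current has length exactly n: shift it by one and append it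
      rw [if_neg (show ¬ ((((p.drop (p.length - n.toNat)).length : Int)) < n) from by
            simp; omega)]
      have hc : (p.drop (p.length - n.toNat)).tail ++ [x] =
          (p ++ [x]).drop (p.length + 1 - n.toNat) := by
        rw [List.tail_drop, List.drop_append_of_le_length (by omega),
            show p.length - n.toNat + 1 = p.length + 1 - n.toNat from by omega]
      rw [if_pos (show ((((p.drop (p.length - n.toNat)).tail ++ [x]).length : Int) = n) from by
            simp; omega)]
      rw [if_pos (show n ≤ (p.length + 1 : Int) from by omega)]
      rw [hc, show (p ++ [x]).length - n.toNat = p.length + 1 - n.toNat from by simp]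

-- ===== VERDICT (by name: the statement is the Claim_ definition above) =====
theorem window_3_spec : Claim_equal_window_3 := by
  intro iterable n _
  unfold Spec_window_3 window_3 window_3_alt
  by_cases hn : n ≤ 0
  · rw [if_pos hn, foldl_wstep_nonpos n hn]
  · rw [if_neg hn, foldl_wstep_invariant n (by omega) iterable]
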